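-- pv_equiv track=rewrite | github.com/21B031249VK/Web-Dev | Lab7/codingbat/List-2/sum13.py | sum13
-- ===== SOURCE A (Python) =====
-- def sum13(nums):
--     s = 0
--     if len(nums) > 0:
--         if nums[0] != 13:
--             s += nums[0]
--     for i in range(1, len(nums)):
--         if nums[i] != 13 and nums[i - 1] != 13:
--             s += nums[i]
--     return s
-- ===== SOURCE B (Python) =====
-- def sum13(nums):
--     # Pass 1: mark every index to exclude — each 13 excludes its own index
--     # and the index right after it.
--     skip = set()
--     for i, v in enumerate(nums):
--         if v == 13:
--             skip.add(i)
--             skip.add(i + 1)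
--     # Pass 2: sum every element whose index was not marked.
--     return sum(v for i, v in enumerate(nums) if i not in skip)
-- ===== Notes on version B (the rewrite author's own statement) =====
-- stated objective: alternative
-- what changed: Replaces A's single guarded index scan by a two-pass exclusion-table decomposition: a first pass over enumerate(nums) builds a set of indices banned by each 13 (its own index and the next), and a second pass sums every element whose index is not in that set.
import Mathlib
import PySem

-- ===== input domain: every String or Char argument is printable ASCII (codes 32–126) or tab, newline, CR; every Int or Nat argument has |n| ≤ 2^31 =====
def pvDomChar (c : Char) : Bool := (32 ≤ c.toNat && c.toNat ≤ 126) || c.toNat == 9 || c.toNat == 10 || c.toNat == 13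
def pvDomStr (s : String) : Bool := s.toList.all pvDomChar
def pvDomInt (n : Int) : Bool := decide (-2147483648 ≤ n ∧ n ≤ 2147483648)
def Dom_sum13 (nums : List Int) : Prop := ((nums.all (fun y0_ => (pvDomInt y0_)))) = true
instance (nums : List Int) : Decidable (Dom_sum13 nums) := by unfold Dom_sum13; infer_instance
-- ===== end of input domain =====

-- B replaces A's single guarded scan by two staged passes: first build an exclusion
-- set of indices (each 13 marks itself and the next index), then sum the unmarked
-- indices; objective: alternative decomposition, same O(n) cost.

-- ===== PORT A =====
def sum13 (nums : List Int) : Int :=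
  -- s = 0; if len > 0 and nums[0] != 13: s += nums[0]
  let s : Int := 0
  let s : Int :=
    if nums.length > 0 then
      if PySem.List.pyGetD nums 0 0 != 13 then s + PySem.List.pyGetD nums 0 0 else s
    else s
  -- for i in range(1, len(nums)): if nums[i] != 13 and nums[i-1] != 13: s += nums[i]
  (PySem.List.pyRange 1 (nums.length : Int) 1).foldl
    (fun s i =>
      if PySem.List.pyGetD nums i 0 != 13 && PySem.List.pyGetD nums (i - 1) 0 != 13 then
        s + PySem.List.pyGetD nums i 0
      else s) s

-- ===== PORT B =====
def sum13_alt (nums : List Int) : Int :=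
  -- skip = set(); for i, v in enumerate(nums): if v == 13: skip.add(i); skip.add(i+1)
  let skip : PySem.Set Int :=
    (PySem.List.enumerate nums 0).foldl
      (fun s iv => if iv.2 == 13 then PySem.Set.add (PySem.Set.add s iv.1) (iv.1 + 1) else s)
      PySem.Set.empty
  -- return sum(v for i, v in enumerate(nums) if i not in skip)
  (((PySem.List.enumerate nums 0).filter
      (fun iv => !(PySem.Set.contains skip iv.1))).map (·.2)).sum

-- ===== PRECONDITION & SPEC =====
def Spec_sum13 (nums : List Int) (out : Int) : Prop := out = sum13_alt nums
instance (nums : List Int) (out : Int) : Decidable (Spec_sum13 nums out) := by unfold Spec_sum13; infer_instance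

-- ===== CLAIM (what is proved, stated in full; the proofs are below) =====
def Claim_equal_sum13 : Prop := ∀ (nums : List Int), Dom_sum13 nums → Spec_sum13 nums (sum13 nums)

-- ===== LEMMAS AND PROOFS =====

-- Common reference value both programs are reduced to: the sum of the elements whose
-- own value and predecessor (0 before the first element) are not 13.
def zipSum (nums : List Int) : Int :=
  (((nums.zip ((0 : Int) :: nums)).filter (fun vp => vp.1 != 13 && vp.2 != 13)).map (·.1)).sum

-- A conditional-accumulate foldl is the sum of the filtered, projected list.
theorem foldl_if_sum (P : Int × Int → Bool) (l : List (Int × Int)) (s : Int) :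
    l.foldl (fun s vp => if P vp then s + vp.1 else s) s
      = s + ((l.filter P).map (·.1)).sum := by
  induction l generalizing s with
  | nil => simp
  | cons x xs ih =>
    by_cases h : P x <;> simp [List.foldl_cons, h, ih, add_assoc]

-- A's loop body, re-expressed as the same fold over the list of (nums[i], nums[i-1]) pairs.
theorem foldl_body_map (xs : List Int) (l : List Int) (s : Int) :
    l.foldl (fun s i =>
        if PySem.List.pyGetD xs i 0 != 13 && PySem.List.pyGetD xs (i - 1) 0 != 13 then
          s + PySem.List.pyGetD xs i 0
        else s) s
      = (l.map (fun i => (PySem.List.pyGetD xs i 0, PySem.List.pyGetD xs (i - 1) 0))).foldl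
          (fun s vp => if vp.1 != 13 && vp.2 != 13 then s + vp.1 else s) s := by
  induction l generalizing s with
  | nil => rfl
  | cons a l ih => simp only [List.foldl_cons, List.map_cons, ih]

-- The (nums[i], nums[i-1]) pairs visited by A's index loop are exactly tail-zip-self.
theorem pairs_eq (nums : List Int) :
    (PySem.List.pyRange 1 (nums.length : Int) 1).map
        (fun i => (PySem.List.pyGetD nums i 0, PySem.List.pyGetD nums (i - 1) 0))
      = nums.tail.zip nums := by
  cases nums with
  | nil => simp [PySem.List.pyRange_one_eq_nil]
  | cons x xs =>
    apply List.ext_getElem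
    · simp [PySem.List.length_pyRange_one]
    · intro k h1 h2
      simp only [List.getElem_map, PySem.List.getElem_pyRange_one, List.getElem_zip,
        List.tail_cons]
      have hk : k < xs.length := by
        simpa [PySem.List.length_pyRange_one] using h1
      simp only [Prod.mk.injEq]
      constructor
      · rw [show (1 : Int) + k = ((k + 1 : Nat) : Int) by omega,
          PySem.List.pyGetD_natCast]
        simp [hk]
      · rw [show (1 : Int) + k - 1 = ((k : Nat) : Int) by omega,
          PySem.List.pyGetD_natCast]
        simp [Nat.lt_succ_of_lt hk]
        rfl

theorem sum13_eq_zipSum (nums : List Int) : sum13 nums = zipSum nums := by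
  cases nums with
  | nil => rfl
  | cons x xs =>
    unfold sum13 zipSum
    rw [foldl_body_map, pairs_eq, List.tail_cons]
    rw [show ((x :: xs).zip ((0 : Int) :: x :: xs))
          = (x, (0 : Int)) :: (xs.zip (x :: xs)) from rfl]
    rw [foldl_if_sum]
    by_cases h : x = 13 <;>
      simp [PySem.List.pyGetD, PySem.List.pyGet?, PySem.List.pyIdx?, h]

-- Membership in the exclusion set built by B's first pass.
theorem mem_mark (l : List (Int × Int)) (s0 : PySem.Set Int) (x : Int) :
    x ∈ l.foldl
        (fun s iv => if iv.2 == 13 then PySem.Set.add (PySem.Set.add s iv.1) (iv.1 + 1) else s)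
        s0
      ↔ x ∈ s0 ∨ ∃ iv ∈ l, iv.2 = 13 ∧ (x = iv.1 ∨ x = iv.1 + 1) := by
  induction l generalizing s0 with
  | nil => simp
  | cons a l ih =>
    rw [List.foldl_cons]
    by_cases h : a.2 = 13
    · rw [if_pos (by simpa using h), ih]
      simp only [PySem.Set.mem_add, List.mem_cons]
      constructor
      · rintro (((hs | h1) | h2) | ⟨iv, hm, h13, hx⟩)
        · exact Or.inl hs
        · exact Or.inr ⟨a, Or.inl rfl, h, Or.inl h1⟩
        · exact Or.inr ⟨a, Or.inl rfl, h, Or.inr h2⟩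
        · exact Or.inr ⟨iv, Or.inr hm, h13, hx⟩
      · rintro (hs | ⟨iv, (rfl | hm), h13, hx⟩)
        · exact Or.inl (Or.inl (Or.inl hs))
        · rcases hx with h1 | h2
          · exact Or.inl (Or.inl (Or.inr h1))
          · exact Or.inl (Or.inr h2)
        · exact Or.inr ⟨iv, hm, h13, hx⟩
    · rw [if_neg (by simpa using h), ih]
      simp only [List.mem_cons]
      constructor
      · rintro (hs | ⟨iv, hm, h13, hx⟩)
        · exact Or.inl hs
        · exact Or.inr ⟨iv, Or.inr hm, h13, hx⟩
      · rintro (hs | ⟨iv, (rfl | hm), h13, hx⟩)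
        · exact Or.inl hs
        · exact absurd h13 h
        · exact Or.inr ⟨iv, hm, h13, hx⟩

-- At a valid index k, B's exclusion set holds k iff nums[k] or its predecessor is 13.
theorem contains_skip (nums : List Int) (k : Nat) (hk : k < nums.length) :
    (PySem.Set.contains
        ((PySem.List.enumerate nums 0).foldl
          (fun s iv => if iv.2 == 13 then PySem.Set.add (PySem.Set.add s iv.1) (iv.1 + 1) else s)
          PySem.Set.empty) (k : Int)) = true
      ↔ nums[k] = 13 ∨ ((0 : Int) :: nums)[k]'(by simpa using Nat.lt_succ_of_lt hk) = 13 := by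
  rw [PySem.Set.contains_iff, mem_mark]
  simp only [PySem.Set.empty, List.not_mem_nil, false_or, PySem.List.mem_enumerate_iff]
  constructor
  · rintro ⟨iv, ⟨j, hj, rfl⟩, h13, hx⟩
    simp only [zero_add] at h13 hx
    rcases hx with h1 | h2
    · have : k = j := by exact_mod_cast h1
      subst this; exact Or.inl h13
    · have : k = j + 1 := by exact_mod_cast h2
      subst this
      exact Or.inr (by simpa using h13)
  · rintro (h | h)
    · exact ⟨((k : Int), nums[k]), ⟨k, hk, by simp⟩, by simpa using h, Or.inl (by simp)⟩
    · cases k with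
      | zero => simp at h
      | succ j =>
        have hj : j < nums.length := Nat.lt_of_succ_lt hk
        refine ⟨((j : Int), nums[j]), ⟨j, hj, by simp⟩, ?_, Or.inr (by push_cast; ring)⟩
        simpa using h
-- Two same-length lists whose entries agree pointwise on the filter predicate and,
-- where kept, on the projection, filter-map to the same list.
theorem filter_map_congr {α β γ : Type} :
    ∀ (l1 : List α) (l2 : List β) (p : α → Bool) (q : β → Bool) (f : α → γ) (g : β → γ),
      l1.length = l2.length →
      (∀ k (h1 : k < l1.length) (h2 : k < l2.length),
          p l1[k] = q l2[k] ∧ (p l1[k] = true → f l1[k] = g l2[k])) →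
      (l1.filter p).map f = (l2.filter q).map g := by
  intro l1
  induction l1 with
  | nil => intro l2 p q f g hlen _; cases l2 with
    | nil => rfl
    | cons y ys => simp at hlen
  | cons x xs ih =>
    intro l2 p q f g hlen hpt
    cases l2 with
    | nil => simp at hlen
    | cons y ys =>
      have h0 := hpt 0 (by simp) (by simp)
      simp only [List.getElem_cons_zero] at h0
      have hrest : (xs.filter p).map f = (ys.filter q).map g := by
        refine ih ys p q f g (by simpa using hlen) ?_
        intro k h1 h2
        have := hpt (k + 1) (by simpa using Nat.succ_lt_succ h1)
          (by simpa using Nat.succ_lt_succ h2)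
        simpa using this
      by_cases hp : p x
      · have hq : q y = true := h0.1 ▸ hp
        simp [hp, hq, h0.2 hp, hrest]
      · have hq : q y = false := by rw [← h0.1]; simpa using hp
        simp [hp, hq, hrest]

theorem alt_unfolded (nums : List Int) :
    sum13_alt nums
      = (((PySem.List.enumerate nums 0).filter
          (fun iv => !(PySem.Set.contains
            ((PySem.List.enumerate nums 0).foldl
              (fun s iv => if iv.2 == 13 then PySem.Set.add (PySem.Set.add s iv.1) (iv.1 + 1) else s)
              PySem.Set.empty) iv.1))).map (·.2)).sum := rfl

theorem alt_eq_zipSum (nums : List Int) : sum13_alt nums = zipSum nums := by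
  rw [alt_unfolded]
  unfold zipSum
  congr 1
  refine filter_map_congr _ _ _ _ _ _ ?_ ?_
  · simp [PySem.List.length_enumerate]
  · intro k h1 h2
    have hk : k < nums.length := by simpa [PySem.List.length_enumerate] using h1
    have hk' : k < ((0 : Int) :: nums).length := by simpa using Nat.lt_succ_of_lt hk
    simp only [PySem.List.getElem_enumerate, List.getElem_zip, zero_add]
    constructor
    · have hcs := contains_skip nums k hk
      by_cases hb : (PySem.Set.contains
          ((PySem.List.enumerate nums 0).foldl
            (fun s iv => if iv.2 == 13 then PySem.Set.add (PySem.Set.add s iv.1) (iv.1 + 1) else s)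
            PySem.Set.empty) (k : Int)) = true
      · rw [hb]; rcases hcs.mp hb with h | h <;> simp [bne, h]
      · have h1 : nums[k] ≠ 13 := fun h => hb (hcs.mpr (Or.inl h))
        have h2 : ((0 : Int) :: nums)[k]'hk' ≠ 13 := fun h => hb (hcs.mpr (Or.inr h))
        rw [Bool.not_eq_true] at hb
        rw [hb]
        simp [bne, h1, h2]
    · intro _
      trivial

theorem sum13_eq_alt (nums : List Int) : sum13 nums = sum13_alt nums := by
  rw [sum13_eq_zipSum, alt_eq_zipSum]

-- ===== VERDICT (by name: the statement is the Claim_ definition above) =====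
theorem sum13_spec : Claim_equal_sum13 := by
  intro nums _
  unfold Spec_sum13
  exact sum13_eq_alt nums
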